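-- pv_equiv track=rewrite | github.com/lyc-aon/successor-agent | src/successor/providers/openai_compat.py | _lookup_openai_fallback
-- ===== SOURCE A (Python) =====
-- _OPENAI_FALLBACK_WINDOWS: tuple[tuple[str, int], ...] = (
--     # GPT-5 family (200K)
--     ("gpt-5", 200_000),
--     # GPT-4.1 family (1M for the long-context variants, 128K for the rest)
--     ("gpt-4.1-mini", 1_000_000),
--     ("gpt-4.1-nano", 1_000_000),
--     ("gpt-4.1", 1_000_000),
--     # GPT-4o family (128K)
--     ("gpt-4o-mini", 128_000),
--     ("gpt-4o", 128_000),
--     ("chatgpt-4o", 128_000),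
--     # GPT-4 turbo (128K)
--     ("gpt-4-turbo", 128_000),
--     ("gpt-4-1106", 128_000),
--     ("gpt-4-0125", 128_000),
--     # GPT-4 base (8K) — note: prefix matches before "gpt-4-turbo" because
--     # the table is searched in declaration order, so the more specific
--     # entries above MUST come first.
--     ("gpt-4", 8_192),
--     # GPT-3.5 turbo (16K for newer, 4K for legacy 0301)
--     ("gpt-3.5-turbo-16k", 16_385),
--     ("gpt-3.5-turbo", 16_385),
--     # Reasoning models — published max context windows
--     ("o4-mini", 200_000),
--     ("o4", 200_000),
--     ("o3-mini", 200_000),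
--     ("o3", 200_000),
--     ("o1-mini", 128_000),
--     ("o1", 200_000),
-- )
--
-- def _lookup_openai_fallback(model_id: str) -> int | None:
--     """Return a hardcoded context window for an OpenAI model id, or None.
--
--     Prefix-matched in declaration order so the most specific entries
--     win (gpt-4-turbo is checked before gpt-4). Returns None for any
--     model that isn't in the table — the caller should fall through
--     to the chat-level default rather than guess.
--     """
--     if not model_id:
--         return None
--     lowered = model_id.lower()
--     for prefix, window in _OPENAI_FALLBACK_WINDOWS:
--         if lowered.startswith(prefix):
--             return window
--     return None
-- ===== SOURCE B (Python) =====
-- _OPENAI_FALLBACK_WINDOWS: tuple[tuple[str, int], ...] = (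
--     ("gpt-5", 200_000),
--     ("gpt-4.1-mini", 1_000_000),
--     ("gpt-4.1-nano", 1_000_000),
--     ("gpt-4.1", 1_000_000),
--     ("gpt-4o-mini", 128_000),
--     ("gpt-4o", 128_000),
--     ("chatgpt-4o", 128_000),
--     ("gpt-4-turbo", 128_000),
--     ("gpt-4-1106", 128_000),
--     ("gpt-4-0125", 128_000),
--     ("gpt-4", 8_192),
--     ("gpt-3.5-turbo-16k", 16_385),
--     ("gpt-3.5-turbo", 16_385),
--     ("o4-mini", 200_000),
--     ("o4", 200_000),
--     ("o3-mini", 200_000),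
--     ("o3", 200_000),
--     ("o1-mini", 128_000),
--     ("o1", 200_000),
-- )
--
--
-- def _lookup_openai_fallback(model_id: str) -> int | None:
--     """Longest-prefix match: scan the whole table once, keeping the window of
--     the longest prefix of the lowered id.  Equivalent to first-match because
--     matching prefixes are nested and the table lists longer prefixes first."""
--     if not model_id:
--         return None
--     lowered = model_id.lower()
--     best = None
--     best_len = -1
--     for prefix, window in _OPENAI_FALLBACK_WINDOWS:
--         if lowered.startswith(prefix) and len(prefix) > best_len:
--             best, best_len = window, len(prefix)
--     return best
-- ===== Notes on version B (the rewrite author's own statement) =====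
-- stated objective: alternative
-- what changed: B replaces A's declaration-order first-match early return with a single full pass that tracks the longest matching prefix (max-length fold); equivalent because any two prefixes matching the same id are nested and the table lists longer prefixes before shorter ones.
import Mathlib
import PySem

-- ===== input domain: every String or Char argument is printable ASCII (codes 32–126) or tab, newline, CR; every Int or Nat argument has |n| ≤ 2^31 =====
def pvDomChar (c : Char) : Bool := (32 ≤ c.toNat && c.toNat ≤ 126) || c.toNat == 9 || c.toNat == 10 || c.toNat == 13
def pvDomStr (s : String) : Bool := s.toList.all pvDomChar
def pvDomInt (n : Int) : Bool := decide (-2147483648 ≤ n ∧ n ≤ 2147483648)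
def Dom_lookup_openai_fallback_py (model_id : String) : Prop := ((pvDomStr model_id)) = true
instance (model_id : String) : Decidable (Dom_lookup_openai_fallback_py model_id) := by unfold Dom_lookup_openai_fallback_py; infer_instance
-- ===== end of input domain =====

-- B does one full pass tracking the longest matching prefix instead of A's declaration-order
-- early return; equivalent because matching prefixes are nested and the table is longest-first.

-- the module constant _OPENAI_FALLBACK_WINDOWS (shared verbatim by both programs)
def pvTable : List (String × Int) :=
  [("gpt-5", 200000),
   ("gpt-4.1-mini", 1000000),
   ("gpt-4.1-nano", 1000000),
   ("gpt-4.1", 1000000),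
   ("gpt-4o-mini", 128000),
   ("gpt-4o", 128000),
   ("chatgpt-4o", 128000),
   ("gpt-4-turbo", 128000),
   ("gpt-4-1106", 128000),
   ("gpt-4-0125", 128000),
   ("gpt-4", 8192),
   ("gpt-3.5-turbo-16k", 16385),
   ("gpt-3.5-turbo", 16385),
   ("o4-mini", 200000),
   ("o4", 200000),
   ("o3-mini", 200000),
   ("o3", 200000),
   ("o1-mini", 128000),
   ("o1", 200000)]

-- ===== PORT A =====
-- A's for-loop with early return: first entry whose prefix matches
def pvScanA (lowered : List Char) : List (String × Int) → Option Int
  | [] => none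
  | (p, w) :: rest =>
      if PySem.Chars.startswith lowered p.toList then some w else pvScanA lowered rest

def lookup_openai_fallback_py (model_id : String) : Option Int :=
  if model_id.toList = [] then none
  else pvScanA (PySem.Chars.lower model_id.toList) pvTable

-- ===== PORT B =====
-- B's loop body: keep (best, best_len), replacing on a strictly longer matching prefix
def pvStepB (lowered : List Char) (acc : Option Int × Int) (e : String × Int) : Option Int × Int :=
  if PySem.Chars.startswith lowered e.1.toList && decide ((e.1.toList.length : Int) > acc.2)
  then (some e.2, (e.1.toList.length : Int)) else acc

def lookup_openai_fallback_py_alt (model_id : String) : Option Int :=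
  if model_id.toList = [] then none
  else (pvTable.foldl (pvStepB (PySem.Chars.lower model_id.toList)) (none, -1)).1

-- ===== PRECONDITION & SPEC =====
def Spec_lookup_openai_fallback_py (model_id : String) (out : Option Int) : Prop := out = lookup_openai_fallback_py_alt model_id
instance (model_id : String) (out : Option Int) : Decidable (Spec_lookup_openai_fallback_py model_id out) := by unfold Spec_lookup_openai_fallback_py; infer_instance

-- ===== CLAIM (what is proved, stated in full; the proofs are below) =====
def Claim_equal_lookup_openai_fallback_py : Prop := ∀ (model_id : String), Dom_lookup_openai_fallback_py model_id → Spec_lookup_openai_fallback_py model_id (lookup_openai_fallback_py model_id)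

-- ===== LEMMAS AND PROOFS =====

-- once the fold holds a match of length L and every later matcher is no longer than L, it is stable
theorem pvFold_stable (s : List Char) (t : List (String × Int)) (b : Option Int) (L : Int)
    (h : ∀ f ∈ t, PySem.Chars.startswith s f.1.toList = true → (f.1.length : Int) ≤ L) :
    t.foldl (pvStepB s) (b, L) = (b, L) := by
  induction t with
  | nil => rfl
  | cons f rest ih =>
      have hrest : ∀ g ∈ rest, PySem.Chars.startswith s g.1.toList = true → (g.1.length : Int) ≤ L :=
        fun g hg => h g (List.mem_cons_of_mem _ hg)
      have hstep : pvStepB s (b, L) f = (b, L) := by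
        by_cases hm : PySem.Chars.startswith s f.1.toList = true
        · have hle : (f.1.length : Int) ≤ L := h f (List.mem_cons_self ..) hm
          simp [pvStepB, hm]
          omega
        · simp [pvStepB, hm]
      simp only [List.foldl_cons, hstep, ih hrest]

-- in the table, an earlier entry's prefix is never a prefix of a later entry's prefix
theorem pvTable_noPrefix :
    List.Pairwise (fun e f : String × Int => ¬ (e.1.toList <+: f.1.toList)) pvTable := by
  decide

-- hence among entries matching the same string, lengths are strictly decreasing along the table
theorem pvTable_good (s : List Char) :
    List.Pairwise (fun e f : String × Int =>
      PySem.Chars.startswith s e.1.toList = true →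
      PySem.Chars.startswith s f.1.toList = true →
      (f.1.length : Int) < (e.1.length : Int)) pvTable := by
  refine pvTable_noPrefix.imp ?_
  intro e f hnp he hf
  have he' := (PySem.Chars.startswith_iff s e.1.toList).mp he
  have hf' := (PySem.Chars.startswith_iff s f.1.toList).mp hf
  rcases List.prefix_or_prefix_of_prefix he' hf' with h | h
  · exact absurd h hnp
  · have hle := h.length_le
    have hne : f.1.toList.length ≠ e.1.toList.length := by
      intro heq
      exact hnp (h.eq_of_length heq ▸ List.prefix_refl _)
    have : f.1.toList.length < e.1.toList.length := lt_of_le_of_ne hle hne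
    simp only [String.length_toList] at this
    exact_mod_cast this

-- first-match scan equals longest-match fold on any table with that property
theorem pvScan_eq_fold (s : List Char) (t : List (String × Int))
    (hg : List.Pairwise (fun e f : String × Int =>
      PySem.Chars.startswith s e.1.toList = true →
      PySem.Chars.startswith s f.1.toList = true →
      (f.1.length : Int) < (e.1.length : Int)) t) :
    pvScanA s t = (t.foldl (pvStepB s) (none, -1)).1 := by
  induction t with
  | nil => rfl
  | cons e rest ih =>
      rcases List.pairwise_cons.mp hg with ⟨hhead, hrest⟩
      by_cases hm : PySem.Chars.startswith s e.1.toList = true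
      · have hstep : pvStepB s (none, -1) e = (some e.2, (e.1.length : Int)) := by
          simp [pvStepB, hm]
          omega
        have hstab := pvFold_stable s rest (some e.2) (e.1.length : Int)
          (fun f hf hmf => le_of_lt (hhead f hf hm hmf))
        simp [pvScanA, hm, List.foldl_cons, hstep, hstab]
      · have hstep : pvStepB s (none, -1) e = (none, -1) := by
          simp [pvStepB, hm]
        simp [pvScanA, hm, List.foldl_cons, hstep, ih hrest]

-- ===== VERDICT (by name: the statement is the Claim_ definition above) =====
theorem lookup_openai_fallback_py_spec : Claim_equal_lookup_openai_fallback_py := by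
  intro model_id _
  unfold Spec_lookup_openai_fallback_py lookup_openai_fallback_py lookup_openai_fallback_py_alt
  by_cases h : model_id.toList = []
  · simp [h]
  · simp only [h, ite_false]
    exact pvScan_eq_fold _ _ (pvTable_good _)
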